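-- pv_equiv track=rewrite | github.com/Fionn88/ccClub-Practice | judge/1111HW0202.py | selectFemale
-- ===== SOURCE A (Python) =====
-- def selectFemale(point, participate_information):
--     if not point:
--         return None
--
--     maxPoint = 0
--     people = []
--     for key,value in point.items():
--         if participate_information.get(key).get("Gender") == "F":
--             if maxPoint < value:
--                 maxPoint = value
--
--     if maxPoint == 0:
--         return None
--     for key,value in point.items():
--         if value != maxPoint:
--             continue
--         elif participate_information.get(key).get("Gender") == "F":
--             people.append(key)
--
--     if people:
--         people = sorted(people)
--         return '-'.join(people)
--     else:
--         return None
-- ===== SOURCE B (Python) =====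
-- def selectFemale(point, participate_information):
--     # one pass: bucket female keys by point value, then pick the best bucket
--     fem = [(value, key) for key, value in point.items()
--            if participate_information[key].get("Gender") == "F"]
--     groups = {}
--     for v, k in fem:
--         groups.setdefault(v, []).append(k)
--     if not groups:
--         return None
--     best = max(groups)
--     if best <= 0:
--         return None
--     return '-'.join(sorted(groups[best]))
-- ===== Notes on version B (the rewrite author's own statement) =====
-- stated objective: alternative
-- what changed: Instead of two scans of point (one to find the best female score, one to collect its holders), B filters the female entries once, buckets keys by score in a dict, and selects the max-score bucket.
import Mathlib
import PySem

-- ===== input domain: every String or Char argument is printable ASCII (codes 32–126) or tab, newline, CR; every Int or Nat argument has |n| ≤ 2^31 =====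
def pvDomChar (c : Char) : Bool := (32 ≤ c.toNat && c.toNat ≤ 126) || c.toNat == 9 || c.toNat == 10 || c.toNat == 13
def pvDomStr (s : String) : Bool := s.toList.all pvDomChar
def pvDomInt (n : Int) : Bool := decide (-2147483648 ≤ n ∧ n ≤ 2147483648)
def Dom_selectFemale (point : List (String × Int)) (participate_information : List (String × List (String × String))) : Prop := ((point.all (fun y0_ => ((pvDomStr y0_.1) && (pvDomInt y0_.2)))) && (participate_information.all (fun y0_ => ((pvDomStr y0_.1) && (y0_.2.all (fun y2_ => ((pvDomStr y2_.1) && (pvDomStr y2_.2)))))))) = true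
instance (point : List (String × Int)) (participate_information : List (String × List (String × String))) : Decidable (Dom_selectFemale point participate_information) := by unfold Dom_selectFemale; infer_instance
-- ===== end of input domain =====

-- B buckets female keys by score in one pass and picks the max-score bucket, instead of A's two scans (alternative decomposition, same cost).

-- ===== PORT A =====
-- shared leaf lookup: participate_information[key]/.get(key) then .get("Gender");
-- 'none' in the outer lookup corresponds to the Python exception (excluded by Pre_).
def pvGender (pi : List (String × List (String × String))) (k : String) : Option String :=
  match pi.find? (fun p => p.1 == k) with
  | none => none
  | some p =>
    match p.2.find? (fun q => q.1 == "Gender") with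
    | none => none
    | some q => some q.2

def selectFemale (point : List (String × Int)) (participate_information : List (String × List (String × String))) : Option String :=
  if point.isEmpty then none
  else
    let maxPoint : Int := point.foldl
      (fun m kv => if pvGender participate_information kv.1 = some "F" then
                     (if m < kv.2 then kv.2 else m) else m) 0
    if maxPoint = 0 then none
    else
      let people : List String := point.foldl
        (fun ps kv => if kv.2 ≠ maxPoint then ps
          else if pvGender participate_information kv.1 = some "F" then ps ++ [kv.1] else ps) []
      if people.isEmpty then none
      else some (PySem.Str.join "-" (PySem.List.sorted people (fun x => x) false))

-- ===== PORT B =====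
def selectFemale_alt (point : List (String × Int)) (participate_information : List (String × List (String × String))) : Option String :=
  let fem : List (Int × String) :=
    (point.filter (fun kv => pvGender participate_information kv.1 = some "F")).map
      (fun kv => (kv.2, kv.1))
  let groups : PySem.Dict Int (List String) :=
    fem.foldl (fun d p => d.modify p.1 [] (fun l => l ++ [p.2])) PySem.Dict.empty
  if groups.items.isEmpty then none
  else
    match PySem.List.max? groups.keys (fun x => x) with
    | none => none
    | some best =>
      if best ≤ 0 then none
      else some (PySem.Str.join "-" (PySem.List.sorted (groups.getD best []) (fun x => x) false))

-- ===== PRECONDITION & SPEC =====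
-- Pre_ excludes exactly the inputs where Python A raises AttributeError: a key of point
-- absent from participate_information (B raises KeyError there too).
def Pre_selectFemale (point : List (String × Int)) (participate_information : List (String × List (String × String))) : Prop :=
  ∀ kv ∈ point, kv.1 ∈ participate_information.map (·.1)
instance (point : List (String × Int)) (participate_information : List (String × List (String × String))) : Decidable (Pre_selectFemale point participate_information) := by unfold Pre_selectFemale; infer_instance

def pvWitness_selectFemale : (List (String × Int)) × (List (String × List (String × String))) :=
  ([("amy", 3), ("bob", 3), ("cat", 1)],
   [("amy", [("Gender", "F")]), ("bob", [("Gender", "F")]), ("cat", [("Gender", "M")])])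

def Spec_selectFemale (point : List (String × Int)) (participate_information : List (String × List (String × String))) (out : Option String) : Prop := out = selectFemale_alt point participate_information
instance (point : List (String × Int)) (participate_information : List (String × List (String × String))) (out : Option String) : Decidable (Spec_selectFemale point participate_information out) := by unfold Spec_selectFemale; infer_instance

-- ===== CLAIM (what is proved, stated in full; the proofs are below) =====
def Claim_equal_selectFemale : Prop := ∀ (point : List (String × Int)) (participate_information : List (String × List (String × String))), Dom_selectFemale point participate_information → Pre_selectFemale point participate_information → Spec_selectFemale point participate_information (selectFemale point participate_information)

-- ===== LEMMAS AND PROOFS =====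

theorem pv_ite_max (m v : Int) : (if m < v then v else m) = max m v := by
  rw [max_def]; split_ifs <;> omega

theorem pv_foldl_max_comm (l : List Int) : ∀ a b : Int,
    l.foldl max (max a b) = max a (l.foldl max b) := by
  induction l with
  | nil => intro a b; rfl
  | cons x t ih =>
    intro a b
    simp only [List.foldl_cons, max_assoc, ih]

theorem pv_maxfold (pi : List (String × List (String × String)))
    (l : List (String × Int)) : ∀ m : Int,
    l.foldl (fun m kv => if pvGender pi kv.1 = some "F" then
        (if m < kv.2 then kv.2 else m) else m) m
    = ((l.filter (fun kv => pvGender pi kv.1 = some "F")).map (·.2)).foldl max m := by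
  induction l with
  | nil => intro m; rfl
  | cons kv t ih =>
    intro m
    rw [List.foldl_cons]
    by_cases h : pvGender pi kv.1 = some "F"
    · rw [if_pos h, ih, pv_ite_max]
      simp [h]
    · rw [if_neg h, ih]
      simp [h]

theorem pv_peoplefold (pi : List (String × List (String × String)))
    (M : Int) (l : List (String × Int)) : ∀ acc : List String,
    l.foldl (fun ps kv => if kv.2 ≠ M then ps
        else if pvGender pi kv.1 = some "F" then ps ++ [kv.1] else ps) acc
    = acc ++ ((l.filter (fun kv => pvGender pi kv.1 = some "F")).filter
        (fun kv => kv.2 == M)).map (·.1) := by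
  induction l with
  | nil => intro acc; simp
  | cons kv t ih =>
    intro acc
    rw [List.foldl_cons]
    by_cases hv : kv.2 = M
    · rw [if_neg (by simpa using hv)]
      by_cases hg : pvGender pi kv.1 = some "F"
      · rw [if_pos hg, ih]
        simp [hv, hg]
      · rw [if_neg hg, ih]
        simp [hg]
    · rw [if_pos (by simpa using hv), ih]
      by_cases hg : pvGender pi kv.1 = some "F"
      · simp [hv, hg]
      · simp [hg]

theorem pv_max_ofList (vs : List Int) (hne : vs ≠ []) :
    PySem.List.max? (PySem.Set.ofList vs) (fun x => x)
    = PySem.List.max? vs (fun x => x) := by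
  have h1 : PySem.List.max? (PySem.Set.ofList vs) (fun x => x) ≠ none := by
    intro h
    rw [PySem.List.max?_eq_none_iff] at h
    obtain ⟨x, t, rfl⟩ := List.exists_cons_of_ne_nil hne
    have : x ∈ PySem.Set.ofList (x :: t) := (PySem.Set.mem_ofList _ _).mpr (List.mem_cons_self ..)
    simp [h] at this
  have h2 : PySem.List.max? vs (fun x => x) ≠ none := by
    intro h; rw [PySem.List.max?_eq_none_iff] at h; exact hne h
  obtain ⟨m1, hm1⟩ := Option.ne_none_iff_exists'.mp h1
  obtain ⟨m2, hm2⟩ := Option.ne_none_iff_exists'.mp h2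
  rw [hm1, hm2]
  have q1 : m1 ∈ vs := (PySem.Set.mem_ofList _ _).mp (PySem.List.max?_mem hm1)
  have q2 : m2 ∈ PySem.Set.ofList vs := (PySem.Set.mem_ofList _ _).mpr (PySem.List.max?_mem hm2)
  have le1 : m1 ≤ m2 := PySem.List.max?_isMax hm2 m1 q1
  have le2 : m2 ≤ m1 := PySem.List.max?_isMax hm1 m2 q2
  exact congrArg some (le_antisymm le1 le2)

theorem selectFemale_spec : Claim_equal_selectFemale := by
  intro point pi _ _
  unfold Spec_selectFemale selectFemale selectFemale_alt
  simp only []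
  set fem0 : List (String × Int) :=
    point.filter (fun kv => pvGender pi kv.1 = some "F") with hfem0
  set vs : List Int := fem0.map (·.2) with hvs
  set fem : List (Int × String) := fem0.map (fun kv => (kv.2, kv.1)) with hfem
  set groups : PySem.Dict Int (List String) :=
    fem.foldl (fun d p => d.modify p.1 [] (fun l => l ++ [p.2])) PySem.Dict.empty with hgroups
  have hkeys : groups.keys = PySem.Set.ofList vs := by
    rw [hgroups, PySem.Dict.keys_foldl_modify_key]
    simp [PySem.Set.update_nil_left, hfem, List.map_map, hvs, Function.comp_def]
  have hitems : groups.items.map (·.1) = groups.keys := rfl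
  have hmaxA : ∀ m : Int,
      point.foldl (fun m kv => if pvGender pi kv.1 = some "F" then
        (if m < kv.2 then kv.2 else m) else m) m = vs.foldl max m :=
    fun m => pv_maxfold pi point m
  rcases hvseq : vs with _ | ⟨v, t⟩
  · -- no female entries: both return none
    have hf0 : fem0 = [] := List.map_eq_nil_iff.mp (hvs ▸ hvseq)
    have hfe : fem = [] := by rw [hfem, hf0]; rfl
    have hg : groups = PySem.Dict.empty := by rw [hgroups, hfe]; rfl
    have hB : groups.items.isEmpty = true := by rw [hg]; rfl
    rw [hB]
    simp only [if_true]
    have h0 : point.foldl (fun m kv => if pvGender pi kv.1 = some "F" then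
        (if m < kv.2 then kv.2 else m) else m) 0 = 0 := by
      rw [hmaxA 0, hvseq]; rfl
    by_cases hp : point.isEmpty
    · rw [if_pos hp]
    · rw [if_neg hp, h0, if_pos rfl]
  · -- at least one female entry
    have hvne : vs ≠ [] := by rw [hvseq]; exact List.cons_ne_nil _ _
    have hpne : ¬ point.isEmpty := by
      intro h
      rw [List.isEmpty_iff] at h
      rw [hfem0, h] at hvs
      rw [hvs] at hvseq
      exact List.cons_ne_nil _ _ hvseq.symm
    rw [if_neg hpne]
    have hkne : groups.keys ≠ [] := by
      rw [hkeys]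
      intro h
      have : v ∈ PySem.Set.ofList vs := (PySem.Set.mem_ofList _ _).mpr (by rw [hvseq]; exact List.mem_cons_self ..)
      rw [h] at this
      exact List.not_mem_nil this
    have hine : groups.items.isEmpty = false := by
      rcases h : groups.items with _ | _
      · exact absurd (by rw [← hitems, h]; rfl) hkne
      · rfl
    rw [hine]
    simp only [Bool.false_eq_true, if_false]
    set M : Int := t.foldl max v with hM
    have hmaxvs : PySem.List.max? vs (fun x => x) = some M := by
      rw [hvseq]; exact PySem.List.max?_id_cons ..
    have hmaxk : PySem.List.max? groups.keys (fun x => x) = some M := by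
      rw [hkeys, pv_max_ofList vs hvne, hmaxvs]
    rw [hmaxk]
    show _ = if M ≤ 0 then none
      else some (PySem.Str.join "-" (PySem.List.sorted (groups.getD M []) (fun x => x) false))
    have hMvs : M ∈ vs := by
      have := PySem.List.max?_mem hmaxvs; exact this
    have hfold0 : vs.foldl max 0 = max 0 M := by
      rw [hvseq]
      show List.foldl max (max 0 v) t = max 0 (t.foldl max v)
      exact pv_foldl_max_comm t 0 v
    by_cases hMle : M ≤ 0
    · -- best female score ≤ 0: both none
      rw [if_pos hMle]
      have : point.foldl (fun m kv => if pvGender pi kv.1 = some "F" then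
          (if m < kv.2 then kv.2 else m) else m) 0 = 0 := by
        rw [hmaxA 0, hfold0]; omega
      rw [this, if_pos rfl]
    · rw [if_neg hMle]
      have hMpos : 0 < M := by omega
      have hmp : point.foldl (fun m kv => if pvGender pi kv.1 = some "F" then
          (if m < kv.2 then kv.2 else m) else m) 0 = M := by
        rw [hmaxA 0, hfold0]; omega
      rw [hmp, if_neg (by omega : ¬ M = 0)]
      have hpeople : point.foldl (fun ps kv => if kv.2 ≠ M then ps
          else if pvGender pi kv.1 = some "F" then ps ++ [kv.1] else ps) ([] : List String)
          = (fem0.filter (fun kv => kv.2 == M)).map (·.1) := by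
        rw [pv_peoplefold pi M point, ← hfem0, List.nil_append]
      have hgetD : groups.getD M [] = (fem0.filter (fun kv => kv.2 == M)).map (·.1) := by
        rw [hgroups, PySem.Dict.getD_foldl_modify_append, PySem.Dict.getD_empty, List.nil_append,
          hfem, List.filter_map, List.map_map]
        rfl
      have hppne : (fem0.filter (fun kv => kv.2 == M)).map (·.1) ≠ [] := by
        obtain ⟨kv, hkv, hkv2⟩ := List.exists_of_mem_map (hvs ▸ hMvs)
        intro h
        rw [List.map_eq_nil_iff, List.filter_eq_nil_iff] at h
        exact h kv hkv (by simp [hkv2])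
      rw [hpeople, hgetD]
      rw [if_neg (by simpa [List.isEmpty_iff] using hppne)]
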